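-- pv_equiv track=rewrite | github.com/orakkuma/TIL | Coding/programmers/가장많이받은선물.py | solution
-- ===== SOURCE A (Python) =====
-- def solution(friends, gifts):
--
--     # 친구들의 이름을 담은 1차원 array - friends
--     # 이번 달까지 친구들이 주고받은 선물 기록을 담은 1차원 문자열 array gifts
--
--     # ["muzi frodo", "muzi frodo", "ryan muzi", "ryan muzi", "ryan muzi", "frodo muzi", "frodo ryan", "neo muzi"]
--     gift_point = {}
--
--     for plus in gifts:
--         names = plus.split()[0]
--         if names in gift_point:
--             gift_point[names] += 1
--         else:
--             gift_point[names] = 1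
--
--     minus_point = {}
--
--     for minus in gifts:
--         names = minus.split()[1]
--         if names in minus_point:
--             minus_point[names] += 1
--         else:
--             minus_point[names] = 1
--
--     result = {}
--
--     for key in gift_point:
--         if key in minus_point:
--             result[key] = gift_point[key] - minus_point[key]
--         else:
--             result[key] = gift_point[key]
--
--     answer = max(result.values())
--
--     return answer
-- ===== SOURCE B (Python) =====
-- def solution(friends, gifts):
--     # one pass: net score per person (gifts given minus received); the overall
--     # maximum net score is always attained by someone who gave a gift, so it
--     # equals A's maximum over givers.
--     score = {}
--     for gift in gifts:
--         giver, receiver = gift.split()[:2]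
--         score[giver] = score.get(giver, 0) + 1
--         score[receiver] = score.get(receiver, 0) - 1
--     return max(score.values())
-- ===== Notes on version B (the rewrite author's own statement) =====
-- stated objective: simpler
-- what changed: Replaces A's three dict-building loops (give counts, receive counts, then a merge over givers) by a single pass maintaining one net-score dict and taking max over all scores, relying on the invariant that net scores sum to zero so the global max is attained by a giver.
import Mathlib
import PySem

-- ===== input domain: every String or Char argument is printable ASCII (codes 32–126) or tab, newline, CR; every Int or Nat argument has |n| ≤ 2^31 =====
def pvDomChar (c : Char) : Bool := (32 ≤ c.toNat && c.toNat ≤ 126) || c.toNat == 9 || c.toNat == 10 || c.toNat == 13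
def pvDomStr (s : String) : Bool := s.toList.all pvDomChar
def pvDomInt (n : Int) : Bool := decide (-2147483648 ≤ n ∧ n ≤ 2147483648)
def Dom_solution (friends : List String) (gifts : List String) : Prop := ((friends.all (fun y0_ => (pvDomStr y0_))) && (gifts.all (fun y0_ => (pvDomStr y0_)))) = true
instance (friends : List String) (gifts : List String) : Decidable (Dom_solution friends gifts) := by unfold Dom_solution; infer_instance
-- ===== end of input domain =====

-- B replaces A's three dict-building loops by one pass over gifts keeping a single net-score
-- dict and taking the max over all its values (objective: simpler).

-- ===== PORT A =====
def solution (friends : List String) (gifts : List String) : Int :=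
  let gift_point := gifts.foldl (fun d plus =>
      let names := PySem.List.pyGetD (PySem.Str.split₀ plus) 0 ""   -- plus.split()[0]; Pre_ keeps it in range
      if d.contains names then d.insert names (d.getD names 0 + 1) else d.insert names 1)
    PySem.Dict.empty
  let minus_point := gifts.foldl (fun d minus =>
      let names := PySem.List.pyGetD (PySem.Str.split₀ minus) 1 ""  -- minus.split()[1]; Pre_ keeps it in range
      if d.contains names then d.insert names (d.getD names 0 + 1) else d.insert names 1)
    PySem.Dict.empty
  let result := gift_point.keys.foldl (fun r key =>
      if minus_point.contains key then
        r.insert key (gift_point.getD key 0 - minus_point.getD key 0)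
      else
        r.insert key (gift_point.getD key 0))
    PySem.Dict.empty
  (PySem.List.max? result.values (fun x => x)).getD 0   -- max(result.values()); Pre_ makes it nonempty

-- ===== PORT B =====
def solution_alt (friends : List String) (gifts : List String) : Int :=
  let score := gifts.foldl (fun d gift =>
      let ws := PySem.Str.split₀ gift
      let giver := PySem.List.pyGetD ws 0 ""       -- gift.split()[:2] unpack; Pre_ keeps both in range
      let receiver := PySem.List.pyGetD ws 1 ""
      let d1 := d.insert giver (d.getD giver 0 + 1)
      d1.insert receiver (d1.getD receiver 0 - 1))
    PySem.Dict.empty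
  (PySem.List.max? score.values (fun x => x)).getD 0   -- max(score.values()); Pre_ makes it nonempty

-- ===== PRECONDITION & SPEC =====
-- Pre_ excludes exactly the inputs on which A raises: empty gifts (ValueError from max)
-- and a gift string with fewer than two whitespace-separated words (IndexError).
def Pre_solution (friends : List String) (gifts : List String) : Prop :=
  gifts ≠ [] ∧ ∀ g ∈ gifts, 2 ≤ (PySem.Str.split₀ g).length
instance (friends : List String) (gifts : List String) : Decidable (Pre_solution friends gifts) := by
  unfold Pre_solution; infer_instance
def pvWitness_solution : List String × List String :=
  (["muzi", "frodo", "ryan"], ["muzi frodo", "ryan muzi", "frodo muzi"])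

def Spec_solution (friends : List String) (gifts : List String) (out : Int) : Prop := out = solution_alt friends gifts
instance (friends : List String) (gifts : List String) (out : Int) : Decidable (Spec_solution friends gifts out) := by unfold Spec_solution; infer_instance

-- ===== CLAIM (what is proved, stated in full; the proofs are below) =====
def Claim_equal_solution : Prop := ∀ (friends : List String) (gifts : List String), Dom_solution friends gifts → Pre_solution friends gifts → Spec_solution friends gifts (solution friends gifts)

-- ===== LEMMAS AND PROOFS =====

-- giver / receiver name of a gift record, and the per-person net score
def pvGiver (g : String) : String := PySem.List.pyGetD (PySem.Str.split₀ g) 0 ""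
def pvRecv (g : String) : String := PySem.List.pyGetD (PySem.Str.split₀ g) 1 ""
def pvNet (gifts : List String) (k : String) : Int :=
  ((gifts.map pvGiver).count k : Int) - ((gifts.map pvRecv).count k : Int)
def pvFlat (gifts : List String) : List String := gifts.flatMap (fun g => [pvGiver g, pvRecv g])

-- A's branchy counting step is the insert-getD-add-one step
theorem pvStepA_eq (d : PySem.Dict String Int) (n : String) :
    (if d.contains n then d.insert n (d.getD n 0 + 1) else d.insert n 1)
      = d.insert n (d.getD n 0 + 1) := by
  by_cases h : d.contains n = true
  · simp [h]
  · have h' : d.contains n = false := by simpa using h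
    simp [h', PySem.Dict.getD_of_not_contains d (0 : Int) h']

theorem pvGP (gifts : List String) :
    gifts.foldl (fun d plus =>
        let names := PySem.List.pyGetD (PySem.Str.split₀ plus) 0 ""
        if d.contains names then d.insert names (d.getD names 0 + 1) else d.insert names 1)
      PySem.Dict.empty = PySem.Dict.counter (gifts.map pvGiver) := by
  simp only [pvStepA_eq]
  rw [← PySem.Dict.foldl_insert_getD_add_one_eq_counter, List.foldl_map]
  rfl

theorem pvMP (gifts : List String) :
    gifts.foldl (fun d minus =>
        let names := PySem.List.pyGetD (PySem.Str.split₀ minus) 1 ""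
        if d.contains names then d.insert names (d.getD names 0 + 1) else d.insert names 1)
      PySem.Dict.empty = PySem.Dict.counter (gifts.map pvRecv) := by
  simp only [pvStepA_eq]
  rw [← PySem.Dict.foldl_insert_getD_add_one_eq_counter, List.foldl_map]
  rfl

-- the value A's third loop stores for a giver key
def pvVal (gifts : List String) (k : String) : Int :=
  if (PySem.Dict.counter (gifts.map pvRecv)).contains k then
    (PySem.Dict.counter (gifts.map pvGiver)).getD k 0 - (PySem.Dict.counter (gifts.map pvRecv)).getD k 0
  else
    (PySem.Dict.counter (gifts.map pvGiver)).getD k 0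

theorem pvVal_eq_net (gifts : List String) (k : String) : pvVal gifts k = pvNet gifts k := by
  unfold pvVal pvNet
  by_cases h : (PySem.Dict.counter (gifts.map pvRecv)).contains k = true
  · simp [h, PySem.Dict.getD_counter]
  · have h' : k ∉ gifts.map pvRecv := by
      intro hm
      rw [PySem.Dict.contains_counter] at h
      exact h (by simpa using hm)
    simp [h, PySem.Dict.getD_counter, List.count_eq_zero_of_not_mem h']

theorem pvA_val (friends gifts : List String) :
    solution friends gifts
      = (PySem.List.max? ((PySem.Set.ofList (gifts.map pvGiver)).map (pvNet gifts)) (fun x => x)).getD 0 := by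
  simp only [solution]
  rw [pvGP, pvMP]
  have hstep : ∀ (r : PySem.Dict String Int) (key : String),
      (if (PySem.Dict.counter (gifts.map pvRecv)).contains key then
        r.insert key ((PySem.Dict.counter (gifts.map pvGiver)).getD key 0
          - (PySem.Dict.counter (gifts.map pvRecv)).getD key 0)
      else
        r.insert key ((PySem.Dict.counter (gifts.map pvGiver)).getD key 0))
      = r.insert key (pvVal gifts key) := by
    intro r key
    unfold pvVal
    by_cases h : (PySem.Dict.counter (gifts.map pvRecv)).contains key = true <;> simp [h]
  simp only [hstep]
  have hfold := PySem.Dict.items_foldl_insert_fresh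
      (PySem.Dict.counter (gifts.map pvGiver)).keys (fun a => a) (pvVal gifts)
      (PySem.Dict.empty : PySem.Dict String Int)
      (by intro a _; simp)
      (by simpa [PySem.Dict.keys_counter] using PySem.Set.nodup_ofList (gifts.map pvGiver))
  have hvals : ((PySem.Dict.counter (gifts.map pvGiver)).keys.foldl
        (fun r key => r.insert key (pvVal gifts key)) PySem.Dict.empty).values
      = (PySem.Set.ofList (gifts.map pvGiver)).map (pvNet gifts) := by
    show (List.map Prod.snd _) = _
    rw [hfold]
    simp [PySem.Dict.keys_counter, Function.comp_def, pvVal_eq_net, PySem.Dict.empty]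
  rw [hvals]

-- one B step, written out (same computation as the lets in solution_alt)
def pvStepB (d : PySem.Dict String Int) (gift : String) : PySem.Dict String Int :=
  (d.insert (pvGiver gift) (d.getD (pvGiver gift) 0 + 1)).insert (pvRecv gift)
    ((d.insert (pvGiver gift) (d.getD (pvGiver gift) 0 + 1)).getD (pvRecv gift) 0 - 1)

-- keys of one insert, as a set operation
theorem pvKeysInsert (d : PySem.Dict String Int) (k : String) (v : Int) :
    (d.insert k v).keys = PySem.Set.add d.keys k := by
  by_cases h : d.contains k = true
  · rw [PySem.Dict.keys_insert_of_contains d v h,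
      PySem.Set.add_of_mem ((PySem.Dict.contains_iff_mem_keys _ _).1 h)]
  · have h' : d.contains k = false := by simpa using h
    rw [PySem.Dict.keys_insert_of_not_contains d v h', PySem.Set.add_of_not_mem]
    intro hm
    exact h ((PySem.Dict.contains_iff_mem_keys _ _).2 hm)

theorem pvKeysB (gifts : List String) (d : PySem.Dict String Int) :
    (gifts.foldl pvStepB d).keys = PySem.Set.update d.keys (pvFlat gifts) := by
  induction gifts generalizing d with
  | nil => simp [pvFlat, PySem.Set.update_nil]
  | cons g t ih =>
      rw [List.foldl_cons, ih]
      have hs : (pvStepB d g).keys = PySem.Set.add (PySem.Set.add d.keys (pvGiver g)) (pvRecv g) := by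
        unfold pvStepB
        rw [pvKeysInsert, pvKeysInsert]
      rw [hs]
      simp only [pvFlat, List.flatMap_cons, List.cons_append, List.nil_append]
      rw [PySem.Set.update_cons, PySem.Set.update_cons]

theorem pvGetDB (gifts : List String) (d : PySem.Dict String Int) (k : String) :
    (gifts.foldl pvStepB d).getD k 0
      = d.getD k 0 + ((gifts.map pvGiver).count k : Int) - ((gifts.map pvRecv).count k : Int) := by
  induction gifts generalizing d with
  | nil => simp
  | cons g t ih =>
      rw [List.foldl_cons, ih]
      have hs : (pvStepB d g).getD k 0
          = d.getD k 0 + (if k = pvGiver g then 1 else 0) - (if k = pvRecv g then 1 else 0) := by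
        unfold pvStepB
        simp only [PySem.Dict.getD_insert]
        split_ifs <;> simp_all <;> omega
      rw [hs]
      simp only [List.map_cons, List.count_cons]
      split_ifs <;> simp_all <;> push_cast <;> omega

theorem pvB_val (friends gifts : List String) :
    solution_alt friends gifts
      = (PySem.List.max? ((PySem.Set.ofList (pvFlat gifts)).map (pvNet gifts)) (fun x => x)).getD 0 := by
  have h0 : solution_alt friends gifts
      = (PySem.List.max? ((gifts.foldl pvStepB PySem.Dict.empty).values) (fun x => x)).getD 0 := rfl
  rw [h0]
  have hk : (gifts.foldl pvStepB PySem.Dict.empty).keys = PySem.Set.ofList (pvFlat gifts) := by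
    rw [pvKeysB]
    exact PySem.Set.update_empty _
  have hnd : (gifts.foldl pvStepB PySem.Dict.empty).keys.Nodup := by
    rw [hk]; exact PySem.Set.nodup_ofList _
  rw [PySem.Dict.values_eq_map_keys _ hnd 0, hk]
  have hmap : List.map (fun k => (gifts.foldl pvStepB PySem.Dict.empty).getD k 0)
        (PySem.Set.ofList (pvFlat gifts))
      = List.map (pvNet gifts) (PySem.Set.ofList (pvFlat gifts)) := by
    apply List.map_congr_left
    intro k _
    rw [pvGetDB]
    simp [pvNet]
  rw [hmap]

-- sum arithmetic helpers
theorem pvSumNonpos (l : List Int) (h : ∀ x ∈ l, x ≤ 0) : l.sum ≤ 0 := by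
  induction l with
  | nil => simp
  | cons a t ih =>
      simp only [List.sum_cons]
      have h1 := h a (by simp)
      have h2 := ih (fun x hx => h x (by simp [hx]))
      omega

theorem pvSumNegMem (l : List Int) (hall : ∀ x ∈ l, x ≤ 0) (y : Int) (hy : y ∈ l) (hneg : y < 0) :
    l.sum < 0 := by
  obtain ⟨s, t, rfl⟩ := List.append_of_mem hy
  have hs := pvSumNonpos s (fun x hx => hall x (by simp [hx]))
  have ht := pvSumNonpos t (fun x hx => hall x (by simp [hx]))
  simp only [List.sum_append, List.sum_cons]
  omega

theorem pvSumMapNeg (K : List String) (b : String → Int) :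
    (K.map fun k => -(b k)).sum = -(K.map b).sum := by
  induction K with
  | nil => simp
  | cons a t ih => simp [ih]; omega

theorem pvSumInd (K : List String) (hK : K.Nodup) (a : String) (ha : a ∈ K) :
    (K.map (fun k => if a = k then (1 : Int) else 0)).sum = 1 := by
  have he : (fun k => if a = k then (1 : Int) else 0)
      = (fun k => if (k == a) = true then (1 : Int) else 0) := by
    funext k
    by_cases h : a = k
    · subst h; simp
    · have h2 : ¬(k = a) := fun e => h e.symm
      simp [h, h2]
  rw [he, PySem.List.sum_map_ite_one_zero]
  have : K.countP (fun k => k == a) = K.count a := rfl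
  rw [this, List.count_eq_one_of_mem hK ha]
  rfl

theorem pvSumCount (l K : List String) (hK : K.Nodup) (hsub : ∀ x ∈ l, x ∈ K) :
    (K.map (fun k => (l.count k : Int))).sum = l.length := by
  induction l with
  | nil => simp
  | cons a t ih =>
      have he : (K.map fun k => (((a :: t).count k : Nat) : Int))
          = K.map (fun k => ((t.count k : Nat) : Int) + (if a = k then (1 : Int) else 0)) := by
        apply List.map_congr_left
        intro k _
        by_cases h : a = k <;> simp [h]
      rw [he, PySem.List.sum_map_add_int, ih (fun x hx => hsub x (by simp [hx])),
        pvSumInd K hK a (hsub a (by simp))]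
      simp

theorem pvSumZero (gifts : List String) :
    ((PySem.Set.ofList (pvFlat gifts)).map (pvNet gifts)).sum = 0 := by
  have hnd := PySem.Set.nodup_ofList (pvFlat gifts)
  have hsubG : ∀ x ∈ gifts.map pvGiver, x ∈ PySem.Set.ofList (pvFlat gifts) := by
    intro x hx
    obtain ⟨g, hg, rfl⟩ := List.mem_map.1 hx
    exact (PySem.Set.mem_ofList _ _).2 (List.mem_flatMap.2 ⟨g, hg, by simp⟩)
  have hsubR : ∀ x ∈ gifts.map pvRecv, x ∈ PySem.Set.ofList (pvFlat gifts) := by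
    intro x hx
    obtain ⟨g, hg, rfl⟩ := List.mem_map.1 hx
    exact (PySem.Set.mem_ofList _ _).2 (List.mem_flatMap.2 ⟨g, hg, by simp⟩)
  have he : ((PySem.Set.ofList (pvFlat gifts)).map (pvNet gifts))
      = (PySem.Set.ofList (pvFlat gifts)).map
          (fun k => ((gifts.map pvGiver).count k : Int) + -(((gifts.map pvRecv).count k : Int))) := by
    apply List.map_congr_left
    intro k _
    simp [pvNet]
    omega
  rw [he, PySem.List.sum_map_add_int, pvSumCount _ _ hnd hsubG, pvSumMapNeg,
    pvSumCount _ _ hnd hsubR]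
  simp

-- the maximum over the net scores of the givers equals the maximum over everyone's
theorem pvMaxEq (L1 L2 : List Int) (h1 : L1 ≠ []) (hsub : ∀ x ∈ L1, x ∈ L2)
    (hdom : ∀ x ∈ L2, x ∈ L1 ∨ x < 0) (hpos : ∃ x ∈ L1, 0 ≤ x) :
    (PySem.List.max? L1 (fun x => x)).getD 0 = (PySem.List.max? L2 (fun x => x)).getD 0 := by
  obtain ⟨m1, hm1⟩ : ∃ m1, PySem.List.max? L1 (fun x => x) = some m1 := by
    cases h : PySem.List.max? L1 (fun x => x) with
    | none => exact absurd ((PySem.List.max?_eq_none_iff _ _).1 h) h1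
    | some m => exact ⟨m, rfl⟩
  have h2 : L2 ≠ [] := by
    intro h
    obtain ⟨y, hy⟩ := List.exists_mem_of_ne_nil L1 h1
    exact (List.not_mem_nil (a := y)) (h ▸ hsub y hy)
  obtain ⟨m2, hm2⟩ : ∃ m2, PySem.List.max? L2 (fun x => x) = some m2 := by
    cases h : PySem.List.max? L2 (fun x => x) with
    | none => exact absurd ((PySem.List.max?_eq_none_iff _ _).1 h) h2
    | some m => exact ⟨m, rfl⟩
  rw [hm1, hm2]
  have a1 : m1 ∈ L1 := PySem.List.max?_mem hm1
  have a2 : m2 ∈ L2 := PySem.List.max?_mem hm2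
  have le1 : m1 ≤ m2 := PySem.List.max?_isMax hm2 m1 (hsub m1 a1)
  obtain ⟨x, hx, hx0⟩ := hpos
  have hxm1 : x ≤ m1 := PySem.List.max?_isMax hm1 x hx
  have hxm2 : x ≤ m2 := PySem.List.max?_isMax hm2 x (hsub x hx)
  rcases hdom m2 a2 with h | h
  · have := PySem.List.max?_isMax hm1 m2 h
    simp
    omega
  · simp
    omega

theorem pvExistsNonneg (gifts : List String) (hne : gifts ≠ []) :
    ∃ x ∈ (PySem.Set.ofList (gifts.map pvGiver)).map (pvNet gifts), 0 ≤ x := by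
  by_contra hcon
  push_neg at hcon
  obtain ⟨g0, t, rfl⟩ := List.exists_cons_of_ne_nil hne
  have hg0A : pvGiver g0 ∈ PySem.Set.ofList ((g0 :: t).map pvGiver) :=
    (PySem.Set.mem_ofList _ _).2 (by simp)
  have hg0B : pvNet (g0 :: t) (pvGiver g0)
      ∈ (PySem.Set.ofList (pvFlat (g0 :: t))).map (pvNet (g0 :: t)) := by
    apply List.mem_map_of_mem
    exact (PySem.Set.mem_ofList _ _).2 (List.mem_flatMap.2 ⟨g0, by simp, by simp⟩)
  have hneg : pvNet (g0 :: t) (pvGiver g0) < 0 :=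
    hcon _ (List.mem_map_of_mem hg0A)
  have hall : ∀ x ∈ (PySem.Set.ofList (pvFlat (g0 :: t))).map (pvNet (g0 :: t)), x ≤ 0 := by
    intro x hx
    obtain ⟨k, _, rfl⟩ := List.mem_map.1 hx
    by_cases hkG : k ∈ (g0 :: t).map pvGiver
    · have : pvNet (g0 :: t) k < 0 :=
        hcon _ (List.mem_map_of_mem ((PySem.Set.mem_ofList _ _).2 hkG))
      omega
    · have h0 : ((g0 :: t).map pvGiver).count k = 0 := List.count_eq_zero_of_not_mem hkG
      simp only [List.map_cons] at h0
      simp only [pvNet, List.map_cons]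
      omega
  have hlt := pvSumNegMem _ hall _ hg0B hneg
  rw [pvSumZero] at hlt
  omega

-- ===== VERDICT (by name: the statement is the Claim_ definition above) =====
theorem solution_spec : Claim_equal_solution := by
  intro friends gifts _hdom hpre
  obtain ⟨hne, _⟩ := hpre
  unfold Spec_solution
  rw [pvA_val, pvB_val]
  apply pvMaxEq
  · intro h
    obtain ⟨g0, t, rfl⟩ := List.exists_cons_of_ne_nil hne
    have : pvNet (g0 :: t) (pvGiver g0)
        ∈ (PySem.Set.ofList ((g0 :: t).map pvGiver)).map (pvNet (g0 :: t)) :=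
      List.mem_map_of_mem ((PySem.Set.mem_ofList _ _).2 (by simp))
    rw [h] at this
    exact List.not_mem_nil this
  · intro x hx
    obtain ⟨k, hk, rfl⟩ := List.mem_map.1 hx
    have hkG : k ∈ gifts.map pvGiver := (PySem.Set.mem_ofList _ _).1 hk
    obtain ⟨g, hg, rfl⟩ := List.mem_map.1 hkG
    exact List.mem_map_of_mem
      ((PySem.Set.mem_ofList _ _).2 (List.mem_flatMap.2 ⟨g, hg, by simp⟩))
  · intro x hx
    obtain ⟨k, hk, rfl⟩ := List.mem_map.1 hx
    by_cases hkG : k ∈ gifts.map pvGiver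
    · exact Or.inl (List.mem_map_of_mem ((PySem.Set.mem_ofList _ _).2 hkG))
    · right
      have h0 : (gifts.map pvGiver).count k = 0 := List.count_eq_zero_of_not_mem hkG
      have hkF : k ∈ pvFlat gifts := (PySem.Set.mem_ofList _ _).1 hk
      obtain ⟨g, hg, hmem⟩ := List.mem_flatMap.1 hkF
      have hmem' : k = pvGiver g ∨ k = pvRecv g := by simpa using hmem
      have hkR : k ∈ gifts.map pvRecv := by
        rcases hmem' with h | h
        · exact absurd (h ▸ List.mem_map_of_mem hg) hkG
        · exact h ▸ List.mem_map_of_mem hg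
      have hx1 : 1 ≤ (gifts.map pvRecv).count k := List.one_le_count_iff.2 hkR
      simp only [pvNet]
      omega
  · exact pvExistsNonneg gifts hne
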